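-- pv_equiv track=rewrite | github.com/yoounseho/topcoder | Q9/python/NumberMagicEasy.py | theNumber
-- ===== SOURCE A (Python) =====
-- def theNumber(answer : str):
--     answerlist = [
--         "YYYY",
--         "YYYN",
--         "YYNY",
--         "YYNN",
--         "YNYY",
--         "YNYN",
--         "YNNY",
--         "YNNN",
--         "NYYY",
--         "NYYN",
--         "NYNY",
--         "NYNN",
--         "NNYY",
--         "NNYN",
--         "NNNY",
--         "NNNN"
--     ]
--
--     for i in range(0, len(answerlist)):
--         if answer == answerlist[i]:
--             return i+1
--     return 0
-- ===== SOURCE B (Python) =====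
-- def theNumber(answer: str):
--     if len(answer) != 4 or any(c not in 'YN' for c in answer):
--         return 0
--     v = 0
--     for c in answer:
--         v = v * 2 + (1 if c == 'N' else 0)
--     return v + 1
-- ===== Notes on version B (the rewrite author's own statement) =====
-- stated objective: simpler
-- what changed: Replaced the 16-string table and linear scan with a length/character validation followed by reading the string as a 4-bit binary number (Y=0, N=1, MSB first) plus 1.
import Mathlib
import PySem

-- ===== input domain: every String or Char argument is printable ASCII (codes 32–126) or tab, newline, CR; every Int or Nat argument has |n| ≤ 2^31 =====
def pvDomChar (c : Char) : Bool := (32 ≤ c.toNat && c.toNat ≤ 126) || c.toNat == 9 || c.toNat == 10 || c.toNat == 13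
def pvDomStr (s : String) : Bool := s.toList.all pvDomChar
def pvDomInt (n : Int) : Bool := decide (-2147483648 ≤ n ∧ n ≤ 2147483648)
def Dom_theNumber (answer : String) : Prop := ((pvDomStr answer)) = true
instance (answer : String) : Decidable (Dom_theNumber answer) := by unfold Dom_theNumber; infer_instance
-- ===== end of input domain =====

-- B replaces A's 16-string table and linear scan by validation + reading the
-- string as a 4-bit binary number (Y=0, N=1, MSB first) plus 1 (objective: simpler).

-- ===== PORT A =====
-- the literal table from A
def pvAnswerList : List String :=
  ["YYYY", "YYYN", "YYNY", "YYNN", "YNYY", "YNYN", "YNNY", "YNNN",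
   "NYYY", "NYYN", "NYNY", "NYNN", "NNYY", "NNYN", "NNNY", "NNNN"]

-- A's 'for i in range(...): if answer == answerlist[i]: return i+1' loop, with early return
def pvScanA (answer : String) : List String → Int → Int
  | [], _ => 0
  | s :: rest, i => if answer = s then i + 1 else pvScanA answer rest (i + 1)

def theNumber (answer : String) : Int := pvScanA answer pvAnswerList 0

-- ===== PORT B =====
def theNumber_alt (answer : String) : Int :=
  let cs := answer.toList
  if cs.length ≠ 4 ∨ cs.any (fun c => !(c == 'Y' || c == 'N')) then 0
  else (cs.foldl (fun v c => v * 2 + (if c = 'N' then 1 else 0)) 0) + 1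

-- ===== PRECONDITION & SPEC =====
def Spec_theNumber (answer : String) (out : Int) : Prop := out = theNumber_alt answer
instance (answer : String) (out : Int) : Decidable (Spec_theNumber answer out) := by unfold Spec_theNumber; infer_instance

-- ===== CLAIM (what is proved, stated in full; the proofs are below) =====
def Claim_equal_theNumber : Prop := ∀ (answer : String), Dom_theNumber answer → Spec_theNumber answer (theNumber answer)

-- ===== LEMMAS AND PROOFS =====

-- A's scan returns 0 when the answer is not in the list
theorem pvScanA_not_mem (answer : String) (l : List String) (i : Int)
    (h : answer ∉ l) : pvScanA answer l i = 0 := by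
  induction l generalizing i with
  | nil => rfl
  | cons s rest ih =>
    simp only [List.mem_cons, not_or] at h
    simp only [pvScanA, if_neg h.1]
    exact ih _ h.2

-- a valid 4-character Y/N string is in A's table
theorem valid_mem (answer : String)
    (hlen : answer.toList.length = 4)
    (hall : ∀ c ∈ answer.toList, c = 'Y' ∨ c = 'N') :
    answer ∈ pvAnswerList := by
  obtain ⟨l, rfl⟩ : ∃ l, answer = String.ofList l :=
    ⟨answer.toList, String.ofList_toList.symm⟩
  rw [String.toList_ofList] at hlen hall
  match l, hlen with
  | [a, b, c, d], _ =>
    have ha := hall a (by simp)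
    have hb := hall b (by simp)
    have hc := hall c (by simp)
    have hd := hall d (by simp)
    rcases ha with rfl | rfl <;> rcases hb with rfl | rfl <;>
      rcases hc with rfl | rfl <;> rcases hd with rfl | rfl <;> decide

theorem theNumber_eq (answer : String) : theNumber answer = theNumber_alt answer := by
  by_cases hmem : answer ∈ pvAnswerList
  · fin_cases hmem <;> decide
  · rw [theNumber, pvScanA_not_mem answer _ _ hmem]
    by_cases hv : answer.toList.length = 4 ∧ ∀ c ∈ answer.toList, c = 'Y' ∨ c = 'N'
    · exact absurd (valid_mem answer hv.1 hv.2) hmem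
    · simp only [not_and, not_forall] at hv
      have hcond : answer.toList.length ≠ 4 ∨
          answer.toList.any (fun c => !(c == 'Y' || c == 'N')) = true := by
        by_cases hlen : answer.toList.length = 4
        · obtain ⟨c, hc, hcv⟩ := hv hlen
          refine Or.inr (List.any_eq_true.mpr ⟨c, hc, ?_⟩)
          simp only [not_or] at hcv
          simp [hcv.1, hcv.2]
        · exact Or.inl hlen
      unfold theNumber_alt
      rw [if_pos hcond]

-- ===== VERDICT (by name: the statement is the Claim_ definition above) =====
theorem theNumber_spec : Claim_equal_theNumber := by
  intro answer _
  exact theNumber_eq answer
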